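-- pv_equiv track=rewrite | github.com/kwang411/SLAC-CS-Research | foobar_challenge.py | answer
-- ===== SOURCE A (Python) =====
-- def answer(start, length):
--     start_nums = [start + i*length for i in range(length)]
--     temp = 0
--     for i in range(length):
--         temp_length = length - i
--         for j in range(temp_length):
--             temp ^= (start_nums[i] + j)
--     return temp
-- ===== SOURCE B (Python) =====
-- def _prefix_xor(n):
--     # XOR of 0..n for n >= 0; for n < 0, XOR of n+1..-1 (so consecutive values telescope)
--     if n >= 0:
--         return [n, 1, n + 1, 0][n % 4]
--     m = -n - 2
--     x = [m, 1, m + 1, 0][m % 4]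
--     return x if (-n - 1) % 2 == 0 else ~x
--
--
-- def answer(start, length):
--     temp = 0
--     for i in range(length):
--         a = start + i * length
--         b = a + length - i
--         temp ^= _prefix_xor(b - 1) ^ _prefix_xor(a - 1)
--     return temp
-- ===== Notes on version B (the rewrite author's own statement) =====
-- stated objective: faster
-- what changed: replaces the nested loop XOR-ing every number individually with one pass over the rows that gets each row's XOR in O(1) from the prefix-XOR closed form (n mod 4 table, extended to negative endpoints via complement), eliminating the inner loop and the precomputed start_nums list
import Mathlib
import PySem

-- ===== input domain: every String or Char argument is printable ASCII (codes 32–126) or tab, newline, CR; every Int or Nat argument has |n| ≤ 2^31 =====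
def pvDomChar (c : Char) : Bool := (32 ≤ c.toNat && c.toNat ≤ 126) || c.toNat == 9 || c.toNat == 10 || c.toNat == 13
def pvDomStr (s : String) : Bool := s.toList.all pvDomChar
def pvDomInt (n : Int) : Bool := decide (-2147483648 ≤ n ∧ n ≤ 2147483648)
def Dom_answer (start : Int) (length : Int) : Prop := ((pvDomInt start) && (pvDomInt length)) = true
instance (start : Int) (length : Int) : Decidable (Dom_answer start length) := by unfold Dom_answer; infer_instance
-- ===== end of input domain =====

-- B replaces A's nested loop (which XORs every number of the triangular block one by one)
-- with a single pass over the rows, obtaining each row's XOR from the prefix-XOR closed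
-- form (the n mod 4 table, extended to negative endpoints via complement).

-- ===== PORT A =====
def answer (start : Int) (length : Int) : Int :=
  let startNums := (PySem.List.pyRange 0 length 1).map (fun i => start + i * length)
  (PySem.List.pyRange 0 length 1).foldl (fun temp i =>
    let tempLength := length - i
    (PySem.List.pyRange 0 tempLength 1).foldl
      (fun t j => PySem.Int.bxor t (PySem.List.pyGetD startNums i 0 + j)) temp) 0

-- ===== PORT B =====
-- [n, 1, n + 1, 0][n % 4]
def pvXr (n : Int) : Int :=
  PySem.List.pyGetD [n, 1, n + 1, 0] (PySem.Int.mod n 4) 0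

-- XOR of 0..n for n >= 0; for n < 0, XOR of n+1..-1 (so consecutive values telescope)
def pvPrefixXor (n : Int) : Int :=
  if 0 ≤ n then pvXr n
  else
    let m := -n - 2
    let x := pvXr m
    if PySem.Int.mod (-n - 1) 2 = 0 then x else Int.not x

def answer_alt (start : Int) (length : Int) : Int :=
  (PySem.List.pyRange 0 length 1).foldl (fun temp i =>
    let a := start + i * length
    let b := a + length - i
    PySem.Int.bxor temp (PySem.Int.bxor (pvPrefixXor (b - 1)) (pvPrefixXor (a - 1)))) 0

-- ===== PRECONDITION & SPEC =====
def Spec_answer (start : Int) (length : Int) (out : Int) : Prop := out = answer_alt start length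
instance (start : Int) (length : Int) (out : Int) : Decidable (Spec_answer start length out) := by unfold Spec_answer; infer_instance

-- ===== CLAIM (what is proved, stated in full; the proofs are below) =====
def Claim_equal_answer : Prop := ∀ (start : Int) (length : Int), Dom_answer start length → Spec_answer start length (answer start length)

-- ===== LEMMAS AND PROOFS =====

-- ~a = -a - 1
theorem pv_not_eq (a : Int) : Int.not a = -a - 1 := by
  cases a <;> simp [Int.not, Int.negSucc_eq] <;> omega

-- XOR complements through its left argument
theorem pv_bx_not_left (a b : Int) :
    PySem.Int.bxor (-a - 1) b = -(PySem.Int.bxor a b) - 1 := by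
  rcases le_or_gt 0 a with ha | ha <;> rcases le_or_gt 0 b with hb | hb <;>
    simp only [PySem.Int.bxor] <;> split_ifs <;>
    try omega
  all_goals
    have h1 : (-(-a - 1) - 1).toNat = a.toNat := by omega
  all_goals rw [h1]
  all_goals omega

theorem pv_bx_not_right (a b : Int) :
    PySem.Int.bxor a (-b - 1) = -(PySem.Int.bxor a b) - 1 := by
  rw [PySem.Int.bxor_comm, pv_bx_not_left, PySem.Int.bxor_comm]

theorem pv_nat_xor_one_even (k : Nat) : (2 * k) ^^^ 1 = 2 * k + 1 := by
  apply Nat.eq_of_testBit_eq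
  intro i
  cases i <;> simp [Nat.testBit_add_one]

theorem pv_nat_xor_one_odd (k : Nat) : (2 * k + 1) ^^^ 1 = 2 * k := by
  rw [← pv_nat_xor_one_even, Nat.xor_assoc]
  simp

theorem pv_nn (x : Int) : -(-x - 1) - 1 = x := by ring

theorem pv_bx_assoc_nn (a b c : Int) (ha : 0 ≤ a) (hb : 0 ≤ b) (hc : 0 ≤ c) :
    PySem.Int.bxor (PySem.Int.bxor a b) c = PySem.Int.bxor a (PySem.Int.bxor b c) := by
  rw [PySem.Int.bxor_of_nonneg ha hb, PySem.Int.bxor_of_nonneg hb hc,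
    PySem.Int.bxor_of_nonneg (by positivity) hc, PySem.Int.bxor_of_nonneg ha (by positivity)]
  simp [Nat.xor_assoc]

theorem pv_bx_assoc (a b c : Int) :
    PySem.Int.bxor (PySem.Int.bxor a b) c = PySem.Int.bxor a (PySem.Int.bxor b c) := by
  rcases le_or_gt 0 a with ha | ha <;> rcases le_or_gt 0 b with hb | hb <;>
    rcases le_or_gt 0 c with hc | hc
  · exact pv_bx_assoc_nn a b c ha hb hc
  · obtain ⟨c', hc', rfl⟩ : ∃ x, 0 ≤ x ∧ c = -x - 1 := ⟨-c - 1, by omega, by omega⟩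
    simp only [pv_bx_not_left, pv_bx_not_right, pv_nn]
    rw [pv_bx_assoc_nn a b c' ha hb hc']
  · obtain ⟨b', hb', rfl⟩ : ∃ x, 0 ≤ x ∧ b = -x - 1 := ⟨-b - 1, by omega, by omega⟩
    simp only [pv_bx_not_left, pv_bx_not_right, pv_nn]
    rw [pv_bx_assoc_nn a b' c ha hb' hc]
  · obtain ⟨b', hb', rfl⟩ : ∃ x, 0 ≤ x ∧ b = -x - 1 := ⟨-b - 1, by omega, by omega⟩
    obtain ⟨c', hc', rfl⟩ : ∃ x, 0 ≤ x ∧ c = -x - 1 := ⟨-c - 1, by omega, by omega⟩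
    simp only [pv_bx_not_left, pv_bx_not_right, pv_nn]
    rw [pv_bx_assoc_nn a b' c' ha hb' hc']
  · obtain ⟨a', ha', rfl⟩ : ∃ x, 0 ≤ x ∧ a = -x - 1 := ⟨-a - 1, by omega, by omega⟩
    simp only [pv_bx_not_left, pv_bx_not_right, pv_nn]
    rw [pv_bx_assoc_nn a' b c ha' hb hc]
  · obtain ⟨a', ha', rfl⟩ : ∃ x, 0 ≤ x ∧ a = -x - 1 := ⟨-a - 1, by omega, by omega⟩
    obtain ⟨c', hc', rfl⟩ : ∃ x, 0 ≤ x ∧ c = -x - 1 := ⟨-c - 1, by omega, by omega⟩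
    simp only [pv_bx_not_left, pv_bx_not_right, pv_nn]
    rw [pv_bx_assoc_nn a' b c' ha' hb hc']
  · obtain ⟨a', ha', rfl⟩ : ∃ x, 0 ≤ x ∧ a = -x - 1 := ⟨-a - 1, by omega, by omega⟩
    obtain ⟨b', hb', rfl⟩ : ∃ x, 0 ≤ x ∧ b = -x - 1 := ⟨-b - 1, by omega, by omega⟩
    simp only [pv_bx_not_left, pv_bx_not_right, pv_nn]
    rw [pv_bx_assoc_nn a' b' c ha' hb' hc]
  · obtain ⟨a', ha', rfl⟩ : ∃ x, 0 ≤ x ∧ a = -x - 1 := ⟨-a - 1, by omega, by omega⟩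
    obtain ⟨b', hb', rfl⟩ : ∃ x, 0 ≤ x ∧ b = -x - 1 := ⟨-b - 1, by omega, by omega⟩
    obtain ⟨c', hc', rfl⟩ : ∃ x, 0 ≤ x ∧ c = -x - 1 := ⟨-c - 1, by omega, by omega⟩
    simp only [pv_bx_not_left, pv_bx_not_right, pv_nn]
    rw [pv_bx_assoc_nn a' b' c' ha' hb' hc']

theorem pv_bx_cancel (x y : Int) : PySem.Int.bxor (PySem.Int.bxor x y) y = x := by
  rw [pv_bx_assoc, PySem.Int.bxor_self, PySem.Int.bxor_zero]

theorem pv_bx_one_even (m : Int) (h : m % 2 = 0) : PySem.Int.bxor m 1 = m + 1 := by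
  rcases le_or_gt 0 m with hm | hm
  · obtain ⟨k, hk⟩ : ∃ k, m.toNat = 2 * k := ⟨m.toNat / 2, by omega⟩
    rw [PySem.Int.bxor_of_nonneg hm (by norm_num)]
    have h1 : (1 : Int).toNat = 1 := rfl
    rw [h1, hk, pv_nat_xor_one_even]
    omega
  · obtain ⟨k, hk, rfl⟩ : ∃ x, 0 ≤ x ∧ m = -x - 1 := ⟨-m - 1, by omega, by omega⟩
    rw [pv_bx_not_left, PySem.Int.bxor_of_nonneg hk (by norm_num)]
    obtain ⟨j, hj⟩ : ∃ j, k.toNat = 2 * j + 1 := ⟨k.toNat / 2, by omega⟩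
    have h1 : (1 : Int).toNat = 1 := rfl
    rw [h1, hj, pv_nat_xor_one_odd]
    omega

theorem pv_mod_pos (n b : Int) (hb : 0 < b) : PySem.Int.mod n b = n % b := by
  simp [PySem.Int.mod, Int.fmod_eq_emod]
  omega

theorem pv_xr_eq (n : Int) :
    pvXr n = if n % 4 = 0 then n else if n % 4 = 1 then 1 else if n % 4 = 2 then n + 1 else 0 := by
  unfold pvXr
  rw [pv_mod_pos n 4 (by norm_num)]
  have h : n % 4 = 0 ∨ n % 4 = 1 ∨ n % 4 = 2 ∨ n % 4 = 3 := by omega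
  rcases h with h | h | h | h <;> rw [h] <;> norm_num <;> rfl

theorem pv_xr_step (k : Int) (hk : 0 ≤ k) : pvXr k = PySem.Int.bxor (pvXr (k - 1)) k := by
  have h : k % 4 = 0 ∨ k % 4 = 1 ∨ k % 4 = 2 ∨ k % 4 = 3 := by omega
  rcases h with h | h | h | h <;>
    [ (have h1 : (k - 1) % 4 = 3 := by omega);
      (have h1 : (k - 1) % 4 = 0 := by omega);
      (have h1 : (k - 1) % 4 = 1 := by omega);
      (have h1 : (k - 1) % 4 = 2 := by omega) ] <;>
    rw [pv_xr_eq, pv_xr_eq] <;> simp only [h, h1] <;> norm_num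
  · rw [PySem.Int.bxor_comm, PySem.Int.bxor_zero]
  · obtain ⟨m, rfl⟩ : ∃ m, k = m + 1 := ⟨k - 1, by ring⟩
    have e2 : m + 1 - 1 = m := by ring
    rw [e2, show m + 1 = PySem.Int.bxor m 1 from (pv_bx_one_even m (by omega)).symm,
      ← pv_bx_assoc, PySem.Int.bxor_self, PySem.Int.bxor_comm, PySem.Int.bxor_zero]
  · rw [PySem.Int.bxor_comm, pv_bx_one_even k (by omega)]

theorem pv_P_neg (k : Int) (hk : 0 ≤ k) :
    pvPrefixXor (-k - 1) = if k % 2 = 0 then pvXr (k - 1) else -(pvXr (k - 1)) - 1 := by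
  dsimp only [pvPrefixXor]
  have e1 : -(-k - 1) - 1 = k := by ring
  have e2 : -(-k - 1) - 2 = k - 1 := by ring
  rw [if_neg (by omega), pv_mod_pos _ 2 (by norm_num), e1, e2, pv_not_eq]

theorem pv_P_step (n : Int) : pvPrefixXor n = PySem.Int.bxor (pvPrefixXor (n - 1)) n := by
  rcases lt_trichotomy n 0 with hn | hn | hn
  · obtain ⟨k, hk, rfl⟩ : ∃ k, 0 ≤ k ∧ n = -k - 1 := ⟨-n - 1, by omega, by ring⟩
    have e : -k - 1 - 1 = -(k + 1) - 1 := by ring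
    rw [pv_P_neg k hk, e, pv_P_neg (k + 1) (by omega)]
    have e2 : k + 1 - 1 = k := by ring
    rcases (by omega : k % 2 = 0 ∨ k % 2 = 1) with hp | hp
    · rw [if_pos hp, if_neg (by omega), e2, pv_bx_not_left, pv_bx_not_right, pv_nn,
        pv_xr_step k hk, pv_bx_cancel]
    · rw [if_neg (by omega), if_pos (by omega), e2, pv_bx_not_right,
        pv_xr_step k hk, pv_bx_cancel]
  · subst hn; decide
  · dsimp only [pvPrefixXor]
    rw [if_pos (by omega), if_pos (by omega)]
    exact pv_xr_step n (by omega)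

theorem pv_inner (m : Nat) (a t : Int) :
    (PySem.List.pyRange 0 (m : Int) 1).foldl (fun t j => PySem.Int.bxor t (a + j)) t
      = PySem.Int.bxor t (PySem.Int.bxor (pvPrefixXor (a + m - 1)) (pvPrefixXor (a - 1))) := by
  induction m generalizing t with
  | zero =>
      rw [PySem.List.pyRange_one_eq_nil (by norm_num)]
      norm_num
  | succ m ih =>
      have hc : ((m + 1 : Nat) : Int) = (m : Int) + 1 := by push_cast; ring
      rw [hc, PySem.List.pyRange_one_succ_right (by positivity), List.foldl_append, ih]
      dsimp only [List.foldl]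
      have e3 : a + ((m : Int) + 1) - 1 = a + (m : Int) := by ring
      have hP : pvPrefixXor (a + ((m : Int) + 1) - 1) =
          PySem.Int.bxor (pvPrefixXor (a + (m : Int) - 1)) (a + (m : Int)) := by
        rw [e3, pv_P_step (a + (m : Int))]
      rw [hP, pv_bx_assoc t, pv_bx_assoc (pvPrefixXor (a + (m : Int) - 1)),
        PySem.Int.bxor_comm (pvPrefixXor (a - 1)) (a + (m : Int)),
        ← pv_bx_assoc (pvPrefixXor (a + (m : Int) - 1))]

-- ===== VERDICT (by name: the statement is the Claim_ definition above) =====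
theorem answer_spec : Claim_equal_answer := by
  intro start length _
  unfold Spec_answer answer answer_alt
  dsimp only
  apply PySem.List.foldl_congr_mem
  intro temp i hi
  rw [PySem.List.mem_pyRange_one] at hi
  dsimp only
  rw [PySem.List.pyGetD_map_pyRange_of_nonneg _ length i 0 hi.1 hi.2]
  have hm : ((length - i).toNat : Int) = length - i := by omega
  rw [← hm, pv_inner ((length - i).toNat) (start + i * length) temp, hm]
  have e : start + i * length + (length - i) - 1 = start + i * length + length - i - 1 := by ring
  rw [e]
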